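-- pv_equiv track=rewrite | github.com/xbasset/gitsummary | gitsummary/analyzers/deployment.py | _infrastructure_notes
-- ===== SOURCE A (Python) =====
-- from typing import Any, Dict, List
--
-- def _infrastructure_notes(files: List[str]) -> List[str]:
--     """Generate notes about infrastructure changes."""
--     if not files:
--         return ["No infrastructure changes detected"]
--
--     notes = [
--         f"{len(files)} infrastructure file(s) modified",
--         "Plan infrastructure changes during maintenance window",
--         "Test in staging environment first",
--     ]
--
--     # Specific infrastructure type guidance
--     if any("k8s" in f or "kubernetes" in f for f in files):
--         notes.append("Kubernetes: Review resource limits and apply with kubectl")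
--     if any("helm" in f for f in files):
--         notes.append("Helm: Update chart version and test upgrade path")
--     if any("terraform" in f or ".tf" in f for f in files):
--         notes.append("Terraform: Run plan before apply, review state changes")
--     if any("github/workflows" in f or "gitlab-ci" in f for f in files):
--         notes.append("CI/CD: Verify pipeline changes don't break builds")
--
--     return notes
-- ===== SOURCE B (Python) =====
-- from typing import List
--
-- def _infrastructure_notes(files: List[str]) -> List[str]:
--     """Generate notes about infrastructure changes (single pass over files)."""
--     if not files:
--         return ["No infrastructure changes detected"]
--
--     k8s = helm = tf = ci = False
--     for f in files:
--         k8s = k8s or ("k8s" in f or "kubernetes" in f)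
--         helm = helm or ("helm" in f)
--         tf = tf or ("terraform" in f or ".tf" in f)
--         ci = ci or ("github/workflows" in f or "gitlab-ci" in f)
--
--     notes = [
--         f"{len(files)} infrastructure file(s) modified",
--         "Plan infrastructure changes during maintenance window",
--         "Test in staging environment first",
--     ]
--     if k8s:
--         notes.append("Kubernetes: Review resource limits and apply with kubectl")
--     if helm:
--         notes.append("Helm: Update chart version and test upgrade path")
--     if tf:
--         notes.append("Terraform: Run plan before apply, review state changes")
--     if ci:
--         notes.append("CI/CD: Verify pipeline changes don't break builds")
--     return notes
-- ===== Notes on version B (the rewrite author's own statement) =====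
-- stated objective: alternative
-- what changed: Replaces four separate any(...) scans over the file list with one pass that accumulates four booleans, then appends the conditional notes from those flags.
import Mathlib
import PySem

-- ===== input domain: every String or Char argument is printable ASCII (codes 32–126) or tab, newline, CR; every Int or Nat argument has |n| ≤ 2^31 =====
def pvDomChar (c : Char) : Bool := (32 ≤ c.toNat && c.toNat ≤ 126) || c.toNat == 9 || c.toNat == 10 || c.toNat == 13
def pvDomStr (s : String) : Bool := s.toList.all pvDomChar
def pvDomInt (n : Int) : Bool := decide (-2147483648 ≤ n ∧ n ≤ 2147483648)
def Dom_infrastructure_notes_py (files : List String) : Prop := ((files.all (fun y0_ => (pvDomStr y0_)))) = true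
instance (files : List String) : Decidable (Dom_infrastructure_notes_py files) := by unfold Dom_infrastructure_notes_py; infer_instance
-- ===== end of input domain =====

-- B replaces A's four separate any(...) scans with one pass accumulating four boolean flags (alternative decomposition; same output).

-- ===== PORT A =====
def infrastructure_notes_py (files : List String) : List String :=
  if files = [] then ["No infrastructure changes detected"]
  else
    let notes : List String :=
      [PySem.Int.toStr (Int.ofNat files.length) ++ " infrastructure file(s) modified",
       "Plan infrastructure changes during maintenance window",
       "Test in staging environment first"]
    let notes := if files.any (fun f => PySem.Str.isIn "k8s" f || PySem.Str.isIn "kubernetes" f)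
      then notes ++ ["Kubernetes: Review resource limits and apply with kubectl"] else notes
    let notes := if files.any (fun f => PySem.Str.isIn "helm" f)
      then notes ++ ["Helm: Update chart version and test upgrade path"] else notes
    let notes := if files.any (fun f => PySem.Str.isIn "terraform" f || PySem.Str.isIn ".tf" f)
      then notes ++ ["Terraform: Run plan before apply, review state changes"] else notes
    let notes := if files.any (fun f => PySem.Str.isIn "github/workflows" f || PySem.Str.isIn "gitlab-ci" f)
      then notes ++ ["CI/CD: Verify pipeline changes don't break builds"] else notes
    notes

-- ===== PORT B =====
def infrastructure_notes_py_alt (files : List String) : List String :=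
  if files = [] then ["No infrastructure changes detected"]
  else
    let flags := files.foldl
      (fun (st : Bool × Bool × Bool × Bool) f =>
        (st.1 || (PySem.Str.isIn "k8s" f || PySem.Str.isIn "kubernetes" f),
         st.2.1 || PySem.Str.isIn "helm" f,
         st.2.2.1 || (PySem.Str.isIn "terraform" f || PySem.Str.isIn ".tf" f),
         st.2.2.2 || (PySem.Str.isIn "github/workflows" f || PySem.Str.isIn "gitlab-ci" f)))
      (false, false, false, false)
    [PySem.Int.toStr (Int.ofNat files.length) ++ " infrastructure file(s) modified",
     "Plan infrastructure changes during maintenance window",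
     "Test in staging environment first"]
    ++ (if flags.1 then ["Kubernetes: Review resource limits and apply with kubectl"] else [])
    ++ (if flags.2.1 then ["Helm: Update chart version and test upgrade path"] else [])
    ++ (if flags.2.2.1 then ["Terraform: Run plan before apply, review state changes"] else [])
    ++ (if flags.2.2.2 then ["CI/CD: Verify pipeline changes don't break builds"] else [])

-- ===== PRECONDITION & SPEC =====
def Spec_infrastructure_notes_py (files : List String) (out : List String) : Prop := out = infrastructure_notes_py_alt files
instance (files : List String) (out : List String) : Decidable (Spec_infrastructure_notes_py files out) := by unfold Spec_infrastructure_notes_py; infer_instance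

-- ===== CLAIM (what is proved, stated in full; the proofs are below) =====
def Claim_equal_infrastructure_notes_py : Prop := ∀ (files : List String), Dom_infrastructure_notes_py files → Spec_infrastructure_notes_py files (infrastructure_notes_py files)

-- ===== LEMMAS AND PROOFS =====

-- B's combined fold computes the same four booleans as A's four `any` scans.
theorem flags_fold_eq (files : List String)
    (p q r s : String → Bool) (a b c d : Bool) :
    files.foldl (fun (st : Bool × Bool × Bool × Bool) f =>
        (st.1 || p f, st.2.1 || q f, st.2.2.1 || r f, st.2.2.2 || s f)) (a, b, c, d)
      = (a || files.any p, b || files.any q, c || files.any r, d || files.any s) := by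
  induction files generalizing a b c d with
  | nil => simp
  | cons x xs ih => simp [List.foldl_cons, ih, Bool.or_assoc]

-- ===== VERDICT (by name: the statement is the Claim_ definition above) =====
theorem infrastructure_notes_py_spec : Claim_equal_infrastructure_notes_py := by
  intro files _
  unfold Spec_infrastructure_notes_py infrastructure_notes_py infrastructure_notes_py_alt
  by_cases h : files = []
  · simp [h]
  · simp only [h, flags_fold_eq, Bool.false_or]
    split_ifs <;> simp
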